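-- pv_equiv track=rewrite | github.com/rakesh-suru/leetcode_solutions | solutions/3783-Mirror-Distance-of-an-Integer/sol3.py | mirrorDistance
-- ===== SOURCE A (Python) =====
-- def mirrorDistance(n: int) -> int:
--     rev = 0
--     temp = n
--
--     while temp:
--         rem = temp % 10
--         rev = rev * 10 + rem
--         temp = temp // 10
--
--     return abs(n - rev)
-- ===== SOURCE B (Python) =====
-- def mirrorDistance(n: int) -> int:
--     # Non-tail recursion on n // 10: returns (digit reversal of t, 10 ** number_of_digits(t)),
--     # combining each low digit with an explicit power AFTER the recursive call.
--     def rev_pow(t: int):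
--         if t == 0:
--             return (0, 1)
--         r, p = rev_pow(t // 10)
--         return (r + (t % 10) * p, p * 10)
--
--     rev, _ = rev_pow(n)
--     return abs(n - rev)
-- ===== Notes on version B (the rewrite author's own statement) =====
-- stated objective: alternative
-- what changed: Replaces A's iterative multiply-accumulate while loop by a non-tail recursion on n//10 that returns the pair (digit reversal, 10^digit-count) and combines each digit with an explicit power after the recursive call; Pre_ excludes n < 0, where A infinite-loops (temp//10 sticks at -1) and B's recursion does not terminate either.
import Mathlib
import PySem

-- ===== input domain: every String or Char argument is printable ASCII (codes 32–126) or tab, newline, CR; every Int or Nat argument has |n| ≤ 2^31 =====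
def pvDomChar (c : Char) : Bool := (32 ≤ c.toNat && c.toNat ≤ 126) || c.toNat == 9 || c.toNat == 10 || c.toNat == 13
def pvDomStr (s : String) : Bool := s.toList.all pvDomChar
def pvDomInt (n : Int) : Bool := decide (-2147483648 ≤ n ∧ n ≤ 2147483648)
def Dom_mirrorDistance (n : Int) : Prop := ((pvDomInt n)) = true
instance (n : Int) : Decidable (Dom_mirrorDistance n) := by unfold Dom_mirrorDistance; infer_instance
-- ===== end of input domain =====

-- B replaces A's iterative multiply-accumulate loop by a non-tail recursion on n // 10
-- returning the pair (digit reversal, 10^digit-count) — an alternative decomposition, same cost.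

-- ===== PORT A =====
-- A's while loop; the fuel only makes the recursion total in Lean (for 0 ≤ temp the guard
-- temp = 0 always fires before the fuel runs out; Python A diverges on temp < 0, excluded by Pre_).
def mirrorALoop : Nat → Int → Int → Int
  | 0, _, rev => rev
  | f + 1, temp, rev =>
    if temp = 0 then rev
    else mirrorALoop f (PySem.Int.floordiv temp 10) (rev * 10 + PySem.Int.mod temp 10)

def mirrorDistance (n : Int) : Int := |n - mirrorALoop (n.toNat + 1) n 0|

-- ===== PORT B =====
-- Source B's rev_pow; fuel for totality only, as above (Source B's recursion diverges on t < 0, excluded by Pre_).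
def revPow : Nat → Int → Int × Int
  | 0, _ => (0, 1)
  | f + 1, t =>
    if t = 0 then (0, 1)
    else
      let rp := revPow f (PySem.Int.floordiv t 10)
      (rp.1 + PySem.Int.mod t 10 * rp.2, rp.2 * 10)

def mirrorDistance_alt (n : Int) : Int := |n - (revPow (n.toNat + 1) n).1|

-- ===== PRECONDITION & SPEC =====
-- Pre_ excludes n < 0: there Python A infinite-loops (temp // 10 sticks at -1), returning nothing.
def Pre_mirrorDistance (n : Int) : Prop := 0 ≤ n
instance (n : Int) : Decidable (Pre_mirrorDistance n) := by unfold Pre_mirrorDistance; infer_instance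
def pvWitness_mirrorDistance : Int := 120

def Spec_mirrorDistance (n : Int) (out : Int) : Prop := out = mirrorDistance_alt n
instance (n : Int) (out : Int) : Decidable (Spec_mirrorDistance n out) := by unfold Spec_mirrorDistance; infer_instance

-- ===== CLAIM (what is proved, stated in full; the proofs are below) =====
def Claim_equal_mirrorDistance : Prop := ∀ (n : Int), Dom_mirrorDistance n → Pre_mirrorDistance n → Spec_mirrorDistance n (mirrorDistance n)

-- ===== LEMMAS AND PROOFS =====
-- Loop invariant: A's accumulator-style loop equals rev * 10^k + reversal, read off B's pair.
lemma mirrorALoop_revPow (f : Nat) : ∀ (t rev : Int), 0 ≤ t → t.toNat < f →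
    mirrorALoop f t rev = rev * (revPow f t).2 + (revPow f t).1 := by
  induction f with
  | zero => intro t rev _ h; omega
  | succ f ih =>
    intro t rev ht hf
    by_cases h0 : t = 0
    · subst h0; simp [mirrorALoop, revPow]
    · have ht1 : 1 ≤ t := by omega
      have hq0 : 0 ≤ PySem.Int.floordiv t 10 := by
        rw [PySem.Int.floordiv_eq_ediv_of_pos (by norm_num)]
        exact Int.ediv_nonneg ht (by norm_num)
      have hqlt : (PySem.Int.floordiv t 10).toNat < f := by
        rw [PySem.Int.floordiv_eq_ediv_of_pos (by norm_num)]
        have : t / 10 < t := Int.ediv_lt_of_lt_mul (by omega) (by linarith)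
        omega
      simp only [mirrorALoop, revPow, if_neg h0]
      rw [ih _ _ hq0 hqlt]
      ring

-- ===== VERDICT (by name: the statement is the Claim_ definition above) =====
theorem mirrorDistance_spec : Claim_equal_mirrorDistance := by
  intro n _ hpre
  unfold Spec_mirrorDistance mirrorDistance mirrorDistance_alt
  rw [mirrorALoop_revPow (n.toNat + 1) n 0 hpre (by omega)]
  ring_nf
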